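-- pv_equiv track=rewrite | github.com/EstevaoUyra/Hamming-Code-8-4 | src/algorithm.py | decode_hamming_8_4_with_guess
-- ===== SOURCE A (Python) =====
-- def hamming_distance(str1, str2):
--     """
--     Calculate the Hamming distance between two strings.
--     """
--     return sum(c1 != c2 for c1, c2 in zip(str1, str2))
--
-- def decode_hamming_8_4(received_code):
--     """
--     Decode an 8-bit (8, 4) Hamming code.
--
--     Parameters:
--     received_code (str): An 8-bit Hamming code.
--
--     Returns:
--     str: The corrected 4-bit data, or an error message if invalid input.
--     """
--     if len(received_code) != 8 or any(bit not in ['0', '1'] for bit in received_code):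
--         return "Invalid code. Please provide 8 bits."
--
--     # Parity bit positions
--     parity_positions = [1, 2, 4, 8]
--
--     # Calculate syndrome
--     syndrome = ''
--     for p in parity_positions:
--         parity = 0
--         for i in range(1, 9):
--             if (i & p) or i == p:
--                 parity ^= int(received_code[i-1])
--         syndrome = str(parity) + syndrome
--
--     # Detect and correct error
--     error_position = int(syndrome, 2)
--     if error_position != 0:
--         if error_position > 8:
--             return "Uncorrectable error detected"
--
--         corrected_code = list(received_code)
--         corrected_code[error_position - 1] = '1' if received_code[error_position - 1] == '0' else '0'
--         received_code = ''.join(corrected_code)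
--
--     # Extract original data
--     data_positions = [3, 5, 6, 7]
--     original_data = ''.join(received_code[i-1] for i in data_positions)
--
--     return original_data
--
-- def decode_hamming_8_4_with_guess(received_code):
--     """
--     Decode an 8-bit (8, 4) Hamming code, guessing the most probable message in case of uncorrectable errors.
--
--     Parameters:
--     received_code (str): An 8-bit Hamming code.
--
--     Returns:
--     str: The corrected 4-bit data, or the most probable data in case of uncorrectable error.
--     """
--     if len(received_code) != 8 or any(bit not in ['0', '1'] for bit in received_code):
--         return "Invalid code. Please provide 8 bits."
--
--     # Standard decoding first
--     decoded = decode_hamming_8_4(received_code)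
--     if decoded != "Uncorrectable error detected":
--         return decoded
--
--     # In case of uncorrectable error, find the most probable message
--     min_distance = len(received_code) + 1
--     most_probable_message = None
--
--     for i in range(8):
--         # Generate single-bit error correction
--         corrected_code = list(received_code)
--         corrected_code[i] = '1' if corrected_code[i] == '0' else '0'
--         corrected_code = ''.join(corrected_code)
--
--         # Decode the corrected code
--         decoded = decode_hamming_8_4(corrected_code)
--         if decoded != "Uncorrectable error detected":
--             # Calculate Hamming distance
--             distance = hamming_distance(received_code, corrected_code)
--             if distance < min_distance:
--                 min_distance = distance
--                 most_probable_message = decoded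
--
--     return most_probable_message if most_probable_message is not None else "No probable message found"
-- ===== SOURCE B (Python) =====
-- def decode_hamming_8_4_with_guess(received_code):
--     """Decode an 8-bit (8,4) Hamming code by computing the syndrome once
--     (XOR of the 1-based positions of set bits, matching A's bit order) and
--     repairing in place; no nested decoder calls or distance loop."""
--     if len(received_code) != 8 or any(c not in '01' for c in received_code):
--         return "Invalid code. Please provide 8 bits."
--
--     bits = [c == '1' for c in received_code]
--     s = 0
--     for j in range(1, 9):
--         if bits[j - 1]:
--             s ^= j
--
--     if 1 <= s <= 8:
--         # single correctable error at position s
--         bits[s - 1] = not bits[s - 1]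
--     elif s > 8:
--         # uncorrectable: flipping position j changes the syndrome to s ^ j;
--         # guess with the smallest j that makes it correctable, then correct
--         j = next(k for k in range(1, 9) if s ^ k <= 8)
--         bits[j - 1] = not bits[j - 1]
--         t = s ^ j
--         if t != 0:
--             bits[t - 1] = not bits[t - 1]
--
--     return ''.join('1' if bits[p - 1] else '0' for p in (3, 5, 6, 7))
-- ===== Notes on version B (the rewrite author's own statement) =====
-- stated objective: simpler
-- what changed: B computes the syndrome once as the XOR of the 1-based positions of set bits and repairs the word in place (flipping bit j, which XORs the syndrome by j, plus the residual correction bit), instead of A's per-parity string-built syndrome, nested decoder re-runs on all eight single-bit flips and Hamming-distance minimisation.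
import Mathlib
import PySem

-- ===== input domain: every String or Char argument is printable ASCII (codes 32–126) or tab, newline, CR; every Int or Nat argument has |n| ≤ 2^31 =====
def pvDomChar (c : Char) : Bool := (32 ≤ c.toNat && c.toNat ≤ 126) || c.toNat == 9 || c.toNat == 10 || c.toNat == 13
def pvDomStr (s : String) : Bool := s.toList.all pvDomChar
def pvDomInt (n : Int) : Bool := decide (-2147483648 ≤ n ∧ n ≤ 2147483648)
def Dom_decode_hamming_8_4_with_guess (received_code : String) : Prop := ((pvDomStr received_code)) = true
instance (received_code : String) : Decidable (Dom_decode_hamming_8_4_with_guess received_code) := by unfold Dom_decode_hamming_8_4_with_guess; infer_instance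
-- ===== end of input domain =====

-- B computes the syndrome once as an XOR of set-bit positions and repairs the word in place,
-- replacing A's nested decoder calls and distance-minimising guess loop; objective: simpler.


-- Both ports work on `List Char` (`PySem.Str` functions are wrappers over char lists; Lean's own
-- `String` operations are opaque to the kernel), and the `String` entry points wrap the cores.

-- "Uncorrectable error detected" as a char list
def pvUncorrectable : List Char :=
  ['U','n','c','o','r','r','e','c','t','a','b','l','e',' ','e','r','r','o','r',' ','d','e','t','e','c','t','e','d']

-- "Invalid code. Please provide 8 bits." as a char list
def pvInvalid : List Char :=
  ['I','n','v','a','l','i','d',' ','c','o','d','e','.',' ','P','l','e','a','s','e',' ','p','r','o','v','i','d','e',' ','8',' ','b','i','t','s','.']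

-- ===== PORT A =====

/-- Port of `hamming_distance`: `sum(c1 != c2 for c1, c2 in zip(str1, str2))`. -/
def hamming_distance_core (s1 s2 : List Char) : Int :=
  ((s1.zip s2).map (fun p => if p.1 ≠ p.2 then (1 : Int) else 0)).sum

/-- A's bit flip `'1' if c == '0' else '0'`. -/
def pvFlipChar (c : Char) : Char := if c == '0' then '1' else '0'

/-- Port of `''.join(received_code[i-1] for i in data_positions)`; the index `i-1 ∈ {2,4,5,6}`
is always in range of the 8-char list, so `getD` is exact (Python raises only out of range). -/
def pvExtractData (cs : List Char) : List Char :=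
  ([3, 5, 6, 7] : List Int).map (fun i => cs.getD (i - 1).toNat '0')

/-- Port of `decode_hamming_8_4`.  Primitive encodings (each exact at its use site):
`range(1, 9)` is the literal list `[1,…,8]`; `i & p` on the nonnegative loop constants is
Nat `&&&`; `parity ^= int(received_code[i-1])` on the 0/1 values `parity` and `int(bit)`
(the guard has validated every char as `'0'`/`'1'`, and the index `i-1 ∈ 0..7` is in range)
is Nat `^^^`; `str(parity)` for `parity ∈ {0, 1}` is the one-digit string; `int(syndrome, 2)`
on the all-binary-digit syndrome string is the base-2 left fold. -/
def decode_hamming_8_4_core (cs : List Char) : List Char :=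
  if (cs.length : Int) ≠ 8 ∨ cs.any (fun bit => !(['0', '1'] : List Char).contains bit) then
    pvInvalid
  else
    let parity_positions : List Int := [1, 2, 4, 8]
    let syndrome : List Char := parity_positions.foldl (fun syndrome p =>
      let parity : Int := ([1, 2, 3, 4, 5, 6, 7, 8] : List Int).foldl (fun parity i =>
        if ((i.toNat &&& p.toNat : Nat) : Int) ≠ 0 ∨ i = p then
          ((parity.toNat ^^^ (if cs.getD (i - 1).toNat '0' == '1' then 1 else 0) : Nat) : Int)
        else parity) 0
      (if parity == 0 then ['0'] else ['1']) ++ syndrome) []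
    let error_position : Int := syndrome.foldl (fun acc c => 2 * acc + (if c == '1' then 1 else 0)) 0
    if error_position ≠ 0 then
      if error_position > 8 then pvUncorrectable
      else
        -- corrected_code[error_position-1] flipped; the 1-based position is in 1..8, in range
        pvExtractData
          (cs.set (error_position - 1).toNat (pvFlipChar (cs.getD (error_position - 1).toNat '0')))
    else pvExtractData cs

/-- Core of A's `decode_hamming_8_4_with_guess`; `range(8)` is the literal list `[0,…,7]`
(indices in range of the validated 8-char list). -/
def decode_hamming_8_4_with_guess_core (cs : List Char) : List Char :=
  if (cs.length : Int) ≠ 8 ∨ cs.any (fun bit => !(['0', '1'] : List Char).contains bit) then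
    pvInvalid
  else
    let decoded := decode_hamming_8_4_core cs
    if decoded ≠ pvUncorrectable then decoded
    else
      -- state = (min_distance, most_probable_message)
      let st := ([0, 1, 2, 3, 4, 5, 6, 7] : List Int).foldl
        (fun (st : Int × Option (List Char)) i =>
          let corrected := cs.set i.toNat (pvFlipChar (cs.getD i.toNat '0'))
          let decoded := decode_hamming_8_4_core corrected
          if decoded ≠ pvUncorrectable then
            let distance := hamming_distance_core cs corrected
            if distance < st.1 then (distance, some decoded) else st
          else st)
        ((cs.length : Int) + 1, (none : Option (List Char)))
      match st.2 with
      | some m => m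
      | none => ['N','o',' ','p','r','o','b','a','b','l','e',' ','m','e','s','s','a','g','e',' ','f','o','u','n','d']

def decode_hamming_8_4_with_guess (received_code : String) : String :=
  String.ofList (decode_hamming_8_4_with_guess_core received_code.toList)

-- ===== PORT B =====

/-- B's in-place flip `bits[i] = not bits[i]` (every call site passes an in-range index). -/
def pvFlipBit (bits : List Bool) (i : Int) : List Bool :=
  bits.set i.toNat (!(bits.getD i.toNat false))

/-- Core of B: syndrome `s` = XOR of the 1-based positions of set bits, then repair in place.
Same primitive encodings as in A's port: `range(1, 9)` is `[1,…,8]`, `s ^ j` / `s ^ k` on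
nonnegative values is Nat `^^^`, and `bits[j-1]` with `j-1 ∈ 0..7` in range is `getD`. -/
def alt_core (cs : List Char) : List Char :=
  if (cs.length : Int) ≠ 8 ∨ cs.any (fun c => !("01".toList).contains c) then
    pvInvalid
  else
    let bits := cs.map (fun c => c == '1')
    let s : Int := ([1, 2, 3, 4, 5, 6, 7, 8] : List Int).foldl
      (fun s j => if bits.getD (j - 1).toNat false then ((s.toNat ^^^ j.toNat : Nat) : Int) else s) 0
    let bits :=
      if 1 ≤ s ∧ s ≤ 8 then
        pvFlipBit bits (s - 1)
      else if s > 8 then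
        -- next(k for k in range(1, 9) if s ^ k <= 8); always found, so the default is unreachable
        let j := (([1, 2, 3, 4, 5, 6, 7, 8] : List Int).find?
          (fun k => decide (((s.toNat ^^^ k.toNat : Nat) : Int) ≤ 8))).getD 1
        let bits := pvFlipBit bits (j - 1)
        let t := ((s.toNat ^^^ j.toNat : Nat) : Int)
        if t ≠ 0 then pvFlipBit bits (t - 1) else bits
      else bits
    ([3, 5, 6, 7] : List Int).map
      (fun p => if bits.getD (p - 1).toNat false then '1' else '0')

def decode_hamming_8_4_with_guess_alt (received_code : String) : String :=
  String.ofList (alt_core received_code.toList)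

-- ===== PRECONDITION & SPEC =====
def Spec_decode_hamming_8_4_with_guess (received_code : String) (out : String) : Prop := out = decode_hamming_8_4_with_guess_alt received_code
instance (received_code : String) (out : String) : Decidable (Spec_decode_hamming_8_4_with_guess received_code out) := by unfold Spec_decode_hamming_8_4_with_guess; infer_instance

-- ===== CLAIM (what is proved, stated in full; the proofs are below) =====
def Claim_equal_decode_hamming_8_4_with_guess : Prop := ∀ (received_code : String), Dom_decode_hamming_8_4_with_guess received_code → Spec_decode_hamming_8_4_with_guess received_code (decode_hamming_8_4_with_guess received_code)

-- ===== LEMMAS AND PROOFS =====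

/-- `'0'`/`'1'` as a function of a bit. -/
def pvC (b : Bool) : Char := if b then '1' else '0'

set_option maxHeartbeats 2000000 in
/-- The two cores agree on every 8-char binary word — exhaustive over the 2^8 codewords. -/
theorem pv_key : ∀ b1 b2 b3 b4 b5 b6 b7 b8 : Bool,
    decode_hamming_8_4_with_guess_core [pvC b1, pvC b2, pvC b3, pvC b4, pvC b5, pvC b6, pvC b7, pvC b8] =
    alt_core [pvC b1, pvC b2, pvC b3, pvC b4, pvC b5, pvC b6, pvC b7, pvC b8] := by
  decide

/-- A validated char is `pvC` of its own bit test. -/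
theorem pv_char01 {c : Char} (h : c = '0' ∨ c = '1') : c = pvC (c == '1') := by
  rcases h with rfl | rfl <;> rfl

/-- The cores agree on every char list. -/
theorem pv_core_eq (l : List Char) :
    decode_hamming_8_4_with_guess_core l = alt_core l := by
  by_cases hg : (l.length : Int) ≠ 8 ∨ l.any (fun bit => !(['0', '1'] : List Char).contains bit)
  · rw [decode_hamming_8_4_with_guess_core, alt_core, if_pos hg, if_pos (by simpa using hg)]
  · rw [not_or] at hg
    obtain ⟨hlen, hall⟩ := hg
    have hlen8 : l.length = 8 := by
      have h8 : (l.length : Int) = 8 := by omega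
      exact_mod_cast h8
    have hmem : ∀ c ∈ l, c = '0' ∨ c = '1' := by
      intro c hc
      have h2 := List.any_eq_false.mp (eq_false_of_ne_true hall) c hc
      by_cases h0 : c = '0'
      · exact Or.inl h0
      · exact Or.inr ((by simpa using h2 : ¬c = '0' → c = '1') h0)
    match l, hlen8 with
    | [c1, c2, c3, c4, c5, c6, c7, c8], _ =>
      rw [pv_char01 (hmem c1 (by simp)), pv_char01 (hmem c2 (by simp)),
          pv_char01 (hmem c3 (by simp)), pv_char01 (hmem c4 (by simp)),
          pv_char01 (hmem c5 (by simp)), pv_char01 (hmem c6 (by simp)),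
          pv_char01 (hmem c7 (by simp)), pv_char01 (hmem c8 (by simp))]
      exact pv_key _ _ _ _ _ _ _ _

-- ===== VERDICT (by name: the statement is the Claim_ definition above) =====
theorem decode_hamming_8_4_with_guess_spec : Claim_equal_decode_hamming_8_4_with_guess := by
  intro received_code _
  unfold Spec_decode_hamming_8_4_with_guess
  unfold decode_hamming_8_4_with_guess decode_hamming_8_4_with_guess_alt
  rw [pv_core_eq]
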